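-- pv_equiv track=rewrite | github.com/sudo-de/arc-agi-2-solver | src/arc_task_solver.py | _resize_grid
-- ===== SOURCE A (Python) =====
-- from typing import Dict, List, Tuple, Optional, Any, Union
--
-- def _resize_grid(grid: List[List[int]], target_h: int, target_w: int) -> List[List[int]]:
--     """Resize grid to target dimensions."""
--
--     if not grid or target_h <= 0 or target_w <= 0:
--         return [[0 for _ in range(max(1, target_w))] for _ in range(max(1, target_h))]
--
--     current_h, current_w = len(grid), len(grid[0])
--
--     if current_h == target_h and current_w == target_w:
--         return grid
--
--     # Create new grid
--     new_grid = []
--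
--     for i in range(target_h):
--         new_row = []
--
--         # Map to source row
--         src_i = min(i, current_h - 1) if current_h > 0 else 0
--
--         for j in range(target_w):
--             # Map to source column
--             src_j = min(j, current_w - 1) if current_w > 0 else 0
--
--             if src_i < len(grid) and src_j < len(grid[src_i]):
--                 new_row.append(grid[src_i][src_j])
--             else:
--                 new_row.append(0)
--
--         new_grid.append(new_row)
--
--     return new_grid
-- ===== SOURCE B (Python) =====
-- from typing import List
--
-- def _resize_grid(grid: List[List[int]], target_h: int, target_w: int) -> List[List[int]]:
--     """Resize grid to target dimensions (separable: horizontal pass, then vertical pass)."""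
--     if not grid or target_h <= 0 or target_w <= 0:
--         return [[0] * max(1, target_w) for _ in range(max(1, target_h))]
--
--     current_h, current_w = len(grid), len(grid[0])
--
--     if current_h == target_h and current_w == target_w:
--         return grid
--
--     # Horizontal pass: resize every source row to target_w using the global width clamp.
--     inter = []
--     for r in grid:
--         sjs = [max(0, min(j, current_w - 1)) for j in range(target_w)]
--         inter.append([r[sj] if sj < len(r) else 0 for sj in sjs])
--
--     # Vertical pass: replicate the clamped intermediate rows.
--     return [list(inter[min(i, current_h - 1)]) for i in range(target_h)]
-- ===== Notes on version B (the rewrite author's own statement) =====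
-- stated objective: alternative
-- what changed: Replaces the single nested (i,j) loop that clamps both coordinates and re-indexes grid per cell with a separable resize: a horizontal pass resizes each source row to target_w once (clamped column indices precomputed once), then a vertical pass only replicates/copies those precomputed rows; often faster in practice, not claimed.
import Mathlib
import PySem

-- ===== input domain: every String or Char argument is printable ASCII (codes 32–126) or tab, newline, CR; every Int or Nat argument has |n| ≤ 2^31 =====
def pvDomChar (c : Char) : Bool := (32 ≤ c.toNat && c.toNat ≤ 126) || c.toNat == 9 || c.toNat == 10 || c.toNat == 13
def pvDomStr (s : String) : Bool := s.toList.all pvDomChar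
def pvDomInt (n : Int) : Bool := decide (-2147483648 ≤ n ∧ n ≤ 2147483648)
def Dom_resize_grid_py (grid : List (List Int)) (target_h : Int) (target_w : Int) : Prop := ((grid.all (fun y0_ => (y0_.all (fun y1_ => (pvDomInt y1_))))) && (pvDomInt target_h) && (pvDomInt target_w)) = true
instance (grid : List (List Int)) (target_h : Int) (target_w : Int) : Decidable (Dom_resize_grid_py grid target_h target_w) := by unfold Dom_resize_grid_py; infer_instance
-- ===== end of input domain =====

-- B replaces the combined per-cell (i,j) clamp loop by a separable resize: a horizontal
-- pass resizing each source row to target_w once, then a vertical pass replicating rows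
-- (objective: alternative decomposition; per-cell clamp work is hoisted out of the vertical loop). On an exact size match both return the input list.

-- ===== PORT A =====
def resize_grid_py (grid : List (List Int)) (target_h : Int) (target_w : Int) : List (List Int) :=
  if grid = [] ∨ target_h ≤ 0 ∨ target_w ≤ 0 then
    (PySem.List.pyRange 0 (max 1 target_h) 1).map (fun _ =>
      (PySem.List.pyRange 0 (max 1 target_w) 1).map (fun _ => (0 : Int)))
  else
    let current_h : Int := grid.length
    let current_w : Int := grid.headI.length
    if (grid.length : Int) = target_h ∧ (grid.headI.length : Int) = target_w then grid
    else
      (PySem.List.pyRange 0 target_h 1).map (fun i =>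
        let src_i : Int := if current_h > 0 then min i (current_h - 1) else 0
        (PySem.List.pyRange 0 target_w 1).map (fun j =>
          let src_j : Int := if current_w > 0 then min j (current_w - 1) else 0
          -- 'src_i < len(grid) and src_j < len(grid[src_i])' guard; indices are in range
          -- whenever the lookup happens, so pyGetD is exact here
          let row := PySem.List.pyGetD grid src_i []
          if src_i < current_h ∧ src_j < (row.length : Int) then
            PySem.List.pyGetD row src_j 0
          else 0))

-- ===== PORT B =====
def resize_grid_py_alt (grid : List (List Int)) (target_h : Int) (target_w : Int) : List (List Int) :=
  if grid = [] ∨ target_h ≤ 0 ∨ target_w ≤ 0 then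
    List.replicate (max 1 target_h).toNat (List.replicate (max 1 target_w).toNat (0 : Int))
  else
    let current_h : Int := grid.length
    let current_w : Int := grid.headI.length
    if (grid.length : Int) = target_h ∧ (grid.headI.length : Int) = target_w then grid
    else
      -- horizontal pass: clamped column indices, then each source row resized to target_w
      let sjs := (PySem.List.pyRange 0 target_w 1).map (fun j => max 0 (min j (current_w - 1)))
      let inter := grid.map (fun r =>
        sjs.map (fun sj => if sj < (r.length : Int) then PySem.List.pyGetD r sj 0 else 0))
      -- vertical pass: replicate the intermediate rows
      (PySem.List.pyRange 0 target_h 1).map (fun i =>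
        PySem.List.pyGetD inter (min i (current_h - 1)) [])

-- ===== PRECONDITION & SPEC =====
def Spec_resize_grid_py (grid : List (List Int)) (target_h : Int) (target_w : Int) (out : List (List Int)) : Prop := out = resize_grid_py_alt grid target_h target_w
instance (grid : List (List Int)) (target_h : Int) (target_w : Int) (out : List (List Int)) : Decidable (Spec_resize_grid_py grid target_h target_w out) := by unfold Spec_resize_grid_py; infer_instance

-- ===== CLAIM (what is proved, stated in full; the proofs are below) =====
def Claim_equal_resize_grid_py : Prop := ∀ (grid : List (List Int)) (target_h : Int) (target_w : Int), Dom_resize_grid_py grid target_h target_w → Spec_resize_grid_py grid target_h target_w (resize_grid_py grid target_h target_w)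

-- ===== LEMMAS AND PROOFS =====

-- ===== VERDICT (by name: the statement is the Claim_ definition above) =====
theorem resize_grid_py_spec : Claim_equal_resize_grid_py := by
  intro grid th tw _
  unfold Spec_resize_grid_py resize_grid_py resize_grid_py_alt
  split_ifs with h1 h2
  · -- zero grids: both are (max 1 th).toNat copies of a zero row
    simp only [PySem.List.pyRange_one, List.map_const',
      List.length_map, List.length_range, Int.sub_zero]
  · rfl
  · -- main case
    dsimp only
    apply List.map_congr_left
    intro i hi
    rw [PySem.List.mem_pyRange_one] at hi
    have hg : grid ≠ [] := by tauto
    have hch : (0:Int) < grid.length := by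
      simpa using List.length_pos_iff.mpr hg
    have hk : 0 ≤ min i ((grid.length : Int) - 1) ∧
        min i ((grid.length : Int) - 1) < (grid.length : Int) := by omega
    rw [PySem.List.pyGetD_eq_getElem _ _ hk.1 (by simpa using hk.2),
        List.getElem_map, List.map_map]
    apply List.map_congr_left
    intro j hj
    rw [PySem.List.mem_pyRange_one] at hj
    simp only [Function.comp, if_pos hch, gt_iff_lt]
    rw [PySem.List.pyGetD_eq_getElem grid [] hk.1 (by simpa using hk.2)]
    have hsj : (if (0:Int) < (grid.headI.length : Int) then
        min j ((grid.headI.length : Int) - 1) else 0)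
        = max 0 (min j ((grid.headI.length : Int) - 1)) := by
      split_ifs <;> omega
    rw [hsj]
    simp only [and_iff_right hk.2]
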